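-- pv_equiv track=rewrite | github.com/kchaudhuri/Python | primeNos.py | answer
-- ===== SOURCE A (Python) =====
-- def answer(num):
--     prime = ""
--     j=0
--     while (len(prime)<(num + 5)):
--         if j > 1:
--            for i in range(2,j):
--                if (j % i) == 0:
--                    break
--            else:
--                prime = prime + str(j)
--
--
--         j=j+1
--     return(prime[num:num+5])
-- ===== SOURCE B (Python) =====
-- def answer(num):
--     target = num + 5
--     primes = []          # all primes found so far, in order
--     total = 0            # total digit count of primes
--     j = 2
--     while total < target:
--         if all(j % p for p in primes if p * p <= j):
--             primes.append(j)
--             total += len(str(j))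
--         j += 1
--     return "".join(str(p) for p in primes)[num:num+5]
-- ===== Notes on version B (the rewrite author's own statement) =====
-- stated objective: faster
-- what changed: B keeps the list of primes found so far and tests each candidate only against those stored primes whose square does not exceed it (A re-scans every integer in range(2,j)), then joins the primes' decimal strings once at the end instead of repeated string concatenation.
import Mathlib
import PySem

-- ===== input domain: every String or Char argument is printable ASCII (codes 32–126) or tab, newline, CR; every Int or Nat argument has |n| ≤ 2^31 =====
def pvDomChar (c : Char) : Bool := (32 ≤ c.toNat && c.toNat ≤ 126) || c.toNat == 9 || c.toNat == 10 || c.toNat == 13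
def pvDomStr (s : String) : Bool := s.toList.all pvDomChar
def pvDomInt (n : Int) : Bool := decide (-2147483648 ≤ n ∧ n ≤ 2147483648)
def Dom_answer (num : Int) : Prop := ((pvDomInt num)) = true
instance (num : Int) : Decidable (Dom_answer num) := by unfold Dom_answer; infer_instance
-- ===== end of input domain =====

-- B replaces A's full-range trial division by division against the stored primes up to the square
-- root, and joins the primes' digit strings once. The fuel below only makes the loops total; each
-- loop exits by its length guard, and the fuel is ample for it.
def pvFuel (num : Int) : Nat := (num + 5).toNat * 64 + 64

-- ===== PORT A =====
-- 'for i in range(2,j): if j % i == 0: break' with its 'else': completes iff no i in [2,j) divides j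
def checkA (j i : Int) : Bool :=
  if i < j then
    (if PySem.Int.mod j i == 0 then false else checkA j (i + 1))
  else true
termination_by (j - i).toNat
decreasing_by omega

def loopA (num : Int) (fuel : Nat) (prime : List Char) (j : Int) : List Char :=
  if (prime.length : Int) < num + 5 then
    match fuel with
    | 0 => prime
    | f + 1 =>
      loopA num f
        (if j > 1 then (if checkA j 2 then prime ++ PySem.Int.toChars j else prime) else prime)
        (j + 1)
  else prime

def answer (num : Int) : String :=
  String.ofList (PySem.List.slice (loopA num (pvFuel num + 2) [] 0) (some num) (some (num + 5)))

-- ===== PORT B =====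
-- 'all(j % p for p in primes if p * p <= j)'
def okB (j : Int) : List Int → Bool
  | [] => true
  | p :: ps =>
      if p * p ≤ j then
        (if PySem.Int.mod j p == 0 then false else okB j ps)
      else okB j ps

def loopB (num : Int) (fuel : Nat) (primes : List Int) (total : Int) (j : Int) : List Int :=
  if total < num + 5 then
    match fuel with
    | 0 => primes
    | f + 1 =>
      if okB j primes then
        loopB num f (primes ++ [j]) (total + PySem.List.len (PySem.Int.toChars j)) (j + 1)
      else loopB num f primes total (j + 1)
  else primes

def answer_alt (num : Int) : String :=
  String.ofList
    (PySem.List.slice ((loopB num (pvFuel num) [] 0 2).flatMap PySem.Int.toChars)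
      (some num) (some (num + 5)))

-- ===== PRECONDITION & SPEC =====
def Spec_answer (num : Int) (out : String) : Prop := out = answer_alt num
instance (num : Int) (out : String) : Decidable (Spec_answer num out) := by unfold Spec_answer; infer_instance

-- ===== CLAIM (what is proved, stated in full; the proofs are below) =====
def Claim_equal_answer : Prop := ∀ (num : Int), Dom_answer num → Spec_answer num (answer num)

-- ===== LEMMAS AND PROOFS =====

lemma checkA_iff (j i : Int) :
    checkA j i = true ↔ ∀ k, i ≤ k → k < j → PySem.Int.mod j k ≠ 0 := by
  fun_induction checkA j i with
  | case1 i h hm =>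
    simp only [beq_iff_eq] at hm
    constructor
    · intro h'; cases h'
    · intro hall; exact absurd hm (hall i le_rfl h)
  | case2 i h hm ih =>
    simp only [beq_iff_eq] at hm
    rw [ih]
    constructor
    · intro hall k hk hkj
      rcases eq_or_lt_of_le hk with rfl | hk'
      · exact hm
      · exact hall k (by omega) hkj
    · intro hall k hk hkj; exact hall k (by omega) hkj
  | case3 i h =>
    constructor
    · intro _ k hk hkj; omega
    · intro _; rfl

lemma okB_iff (j : Int) (primes : List Int) :
    okB j primes = true ↔ ∀ p ∈ primes, p * p ≤ j → PySem.Int.mod j p ≠ 0 := by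
  induction primes with
  | nil => simp [okB]
  | cons p ps ih =>
    simp only [okB]
    split_ifs with hsq hm
    · simp only [beq_iff_eq] at hm
      constructor
      · intro h'; cases h'
      · intro hall; exact absurd hm (hall p (by simp) hsq)
    · simp only [beq_iff_eq] at hm
      rw [ih]
      constructor
      · intro hall q hq hqq
        rcases List.mem_cons.mp hq with rfl | hq'
        · exact hm
        · exact hall q hq' hqq
      · intro hall q hq hqq; exact hall q (by simp [hq]) hqq
    · rw [ih]
      constructor
      · intro hall q hq hqq
        rcases List.mem_cons.mp hq with rfl | hq'
        · omega
        · exact hall q hq' hqq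
      · intro hall q hq hqq; exact hall q (by simp [hq]) hqq

-- The invariant on B's prime list: exactly the integers below j that pass A's full-range test.
def PrimesInv (primes : List Int) (j : Int) : Prop :=
  ∀ p : Int, p ∈ primes ↔ (2 ≤ p ∧ p < j ∧ checkA p 2 = true)

-- A Nat prime passes A's full-range test.
lemma checkA_of_prime (p : Nat) (hp : p.Prime) : checkA (p : Int) 2 = true := by
  rw [checkA_iff]
  intro k hk hkp hm
  have hdvd : k ∣ (p : Int) := (PySem.Int.mod_eq_zero_iff_dvd _ _).mp hm
  have hk0 : 0 ≤ k := by omega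
  obtain ⟨m, rfl⟩ := Int.eq_ofNat_of_zero_le hk0
  have : m ∣ p := by exact_mod_cast hdvd
  rcases (Nat.Prime.eq_one_or_self_of_dvd hp m this) with h1 | h2 <;> omega

-- Given the invariant, B's test against stored primes equals A's full-range test.
lemma cond_equiv (primes : List Int) (j : Int) (hj : 2 ≤ j) (hinv : PrimesInv primes j) :
    okB j primes = checkA j 2 := by
  rw [Bool.eq_iff_iff, okB_iff, checkA_iff]
  constructor
  · intro hall k h2 hkj hmod
    -- j has a divisor in [2, j): its least prime factor is stored and divides j
    have hkdvd : k ∣ j := (PySem.Int.mod_eq_zero_iff_dvd _ _).mp hmod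
    set n := j.toNat with hn
    have hjn : (n : Int) = j := Int.toNat_of_nonneg (by omega)
    have hnp : ¬ n.Prime := by
      intro hprime
      have hk0 : 0 ≤ k := by omega
      obtain ⟨m, rfl⟩ := Int.eq_ofNat_of_zero_le hk0
      have : m ∣ n := by
        have : (m : Int) ∣ (n : Int) := by rw [hjn]; exact hkdvd
        exact_mod_cast this
      rcases Nat.Prime.eq_one_or_self_of_dvd hprime m this with h1 | h2 <;> omega
    set q := n.minFac with hq
    have hn1 : n ≠ 1 := by omega
    have hqp : q.Prime := Nat.minFac_prime hn1
    have hqdvd : q ∣ n := Nat.minFac_dvd n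
    have hsq : q * q ≤ n := by
      have := Nat.minFac_sq_le_self (by omega) hnp
      nlinarith [this, sq_nonneg q]
    have hq2 : 2 ≤ q := hqp.two_le
    have hqlt : (q : Int) < j := by
      rcases Nat.lt_or_ge q n with h | h
      · omega
      · have := Nat.le_of_dvd (by omega) hqdvd
        have : q = n := by omega
        exact absurd (this ▸ hqp) hnp
    have hmem : (q : Int) ∈ primes := (hinv q).mpr ⟨by exact_mod_cast hq2, hqlt, checkA_of_prime q hqp⟩
    have hqq : (q : Int) * (q : Int) ≤ j := by
      have : ((q * q : Nat) : Int) ≤ (n : Int) := by exact_mod_cast hsq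
      push_cast at this; omega
    refine hall q hmem hqq ?_
    rw [PySem.Int.mod_eq_zero_iff_dvd]
    have : (q : Int) ∣ (n : Int) := by exact_mod_cast hqdvd
    rwa [hjn] at this
  · intro hall p hmem hpp
    obtain ⟨h2, hlt, _⟩ := (hinv p).mp hmem
    exact hall p h2 hlt

lemma lock (num : Int) (f : Nat) :
    ∀ (primes : List Int) (j : Int), 2 ≤ j → PrimesInv primes j →
      loopA num f (primes.flatMap PySem.Int.toChars) j
        = (loopB num f primes
            (((primes.flatMap PySem.Int.toChars).length : Nat) : Int) j).flatMap
            PySem.Int.toChars := by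
  induction f with
  | zero =>
    intro primes j hj hinv
    rw [loopA, loopB]
    split <;> rfl
  | succ f ih =>
    intro primes j hj hinv
    rw [loopA, loopB]
    by_cases hg : (((primes.flatMap PySem.Int.toChars).length : Nat) : Int) < num + 5
    · simp only [if_pos hg]
      have hj1 : j > 1 := by omega
      rw [if_pos hj1, ← cond_equiv primes j hj hinv]
      by_cases hp : okB j primes = true
      · simp only [if_pos hp]
        have hcA : checkA j 2 = true := by rw [← cond_equiv primes j hj hinv]; exact hp
        have hflat : primes.flatMap PySem.Int.toChars ++ PySem.Int.toChars j
            = (primes ++ [j]).flatMap PySem.Int.toChars := by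
          simp
        have hlen : (((primes.flatMap PySem.Int.toChars).length : Nat) : Int)
              + PySem.List.len (PySem.Int.toChars j)
            = ((((primes ++ [j]).flatMap PySem.Int.toChars).length : Nat) : Int) := by
          simp [PySem.List.len_eq]
        rw [hflat, hlen]
        refine ih (primes ++ [j]) (j + 1) (by omega) ?_
        intro p
        simp only [List.mem_append, List.mem_singleton, hinv p]
        constructor
        · rintro (⟨h2, hlt, hc⟩ | rfl)
          · exact ⟨h2, by omega, hc⟩
          · exact ⟨hj, by omega, hcA⟩
        · rintro ⟨h2, hlt, hc⟩
          by_cases hpj : p = j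
          · right; exact hpj
          · left; exact ⟨h2, by omega, hc⟩
      · simp only [if_neg hp]
        have hcA : checkA j 2 = false := by
          rw [← cond_equiv primes j hj hinv]; exact Bool.eq_false_iff.mpr hp
        refine ih primes (j + 1) (by omega) ?_
        intro p
        rw [hinv p]
        constructor
        · rintro ⟨h2, hlt, hc⟩; exact ⟨h2, by omega, hc⟩
        · rintro ⟨h2, hlt, hc⟩
          refine ⟨h2, ?_, hc⟩
          by_cases hpj : p = j
          · subst hpj; rw [hcA] at hc; cases hc
          · omega
    · simp only [if_neg hg]

lemma loops_agree (num : Int) :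
    loopA num (pvFuel num + 2) [] 0 = (loopB num (pvFuel num) [] 0 2).flatMap PySem.Int.toChars := by
  by_cases h5 : (0 : Int) < num + 5
  · have h1 : loopA num (pvFuel num + 2) [] 0 = loopA num (pvFuel num + 1) [] 1 := by
      rw [loopA]
      norm_num [h5]
    have h2 : loopA num (pvFuel num + 1) [] 1 = loopA num (pvFuel num) [] 2 := by
      rw [loopA]
      norm_num [h5]
    rw [h1, h2]
    have := lock num (pvFuel num) [] 2 (by omega) (by intro p; simp; omega)
    simpa using this
  · rw [loopA.eq_def, loopB.eq_def]
    norm_num [h5]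

-- ===== VERDICT (by name: the statement is the Claim_ definition above) =====
theorem answer_spec : Claim_equal_answer := by
  intro num _
  unfold Spec_answer answer answer_alt
  rw [loops_agree]
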